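-- pv_equiv track=rewrite | github.com/pwilmart/PAW_pipeline | make_PAW_TXT_from_PD1.4.py | parse_mods
-- ===== SOURCE A (Python) =====
-- def parse_mods(modstring):
--     """Parses PD modification descriptions to get
--     modification types and count of affected residues.
--
--     modifications returned as dictionary of modtypes and dictionary of residues and counts.
--     empty mod descriptions should return empty structures.
--     """
--     mods = {}
--
--     # split modification description string
--     modlist = modstring.split(';')
--     for mod in modlist:
--         mod = mod.strip()   # get rid of whitespace
--         mod = mod.replace(')(', '_')    # protein terminal mods look like: "N-Term(Prot)(Acetyl)"
--         temp = mod[:-1].split('(') # separate part inside ()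
--         residue = ''.join([c for c in temp[0] if not c.isdigit()]) # ignore positions
--         modtype = temp[1]
--
--         # mods is a dictionary of modtype where each modtype value is a count dictionary {residue: count}
--         if modtype in mods:
--             if residue in mods[modtype]:
--                 mods[modtype][residue] += 1
--             else:
--                 mods[modtype][residue] = 1
--         else:
--             mods[modtype] = {residue: 1}
--     return mods
-- ===== SOURCE B (Python) =====
-- def _token_pair(tok):
--     mod = tok.strip().replace(')(', '_')
--     temp = mod[:-1].split('(')
--     residue = ''.join([c for c in temp[0] if not c.isdigit()])
--     return temp[1], residue
--
-- def parse_mods(modstring):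
--     """Two-pass rewrite: first parse every semicolon-separated token into a (modtype, residue)
--     pair, then group the pairs by modtype and count residues per group."""
--     pairs = [_token_pair(tok) for tok in modstring.split(';')]
--     groups = {}
--     for modtype, residue in pairs:
--         groups.setdefault(modtype, []).append(residue)
--     return {mt: {r: rs.count(r) for r in dict.fromkeys(rs)} for mt, rs in groups.items()}
-- ===== Notes on version B (the rewrite author's own statement) =====
-- stated objective: alternative
-- what changed: A's single loop that updates a nested dict-of-counts in place is re-decomposed into three passes: parse every semicolon-separated token to a (modtype, residue) pair, group the residues by modtype with setdefault, then build the result as a dict comprehension counting each distinct residue per group.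
import Mathlib
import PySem

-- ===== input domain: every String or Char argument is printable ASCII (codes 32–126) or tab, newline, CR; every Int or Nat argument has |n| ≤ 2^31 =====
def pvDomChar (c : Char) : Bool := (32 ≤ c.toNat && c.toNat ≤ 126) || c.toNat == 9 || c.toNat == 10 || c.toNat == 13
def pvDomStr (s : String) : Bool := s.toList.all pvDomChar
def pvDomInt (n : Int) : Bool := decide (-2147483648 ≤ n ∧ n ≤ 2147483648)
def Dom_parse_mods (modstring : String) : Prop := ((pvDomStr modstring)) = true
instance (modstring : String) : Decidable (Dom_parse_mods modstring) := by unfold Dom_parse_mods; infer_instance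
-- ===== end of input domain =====

-- B re-decomposes A's single loop into parse-to-pairs / group / count passes; objective: alternative decomposition (same cost).
-- ===== PORT A =====
-- A builds a dict of dicts in one loop over the ';'-tokens, updating nested counts in place.
def parse_mods (modstring : String) : List (String × List (String × Int)) :=
  let modlist := (PySem.Chars.splitOn modstring.toList [';']).map String.mk
  let mods := modlist.foldl (fun mods mod =>
    let mod1 := PySem.Chars.strip mod.toList                         -- mod = mod.strip()
    let mod2 := PySem.Chars.replace mod1 [')','('] ['_']             -- mod = mod.replace(')(', '_')
    let temp := PySem.Chars.splitOn (PySem.List.slice mod2 none (some (-1))) ['(']  -- temp = mod[:-1].split('(')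
    let residue := String.mk (((PySem.List.pyGet? temp 0).getD []).filter (fun c => !PySem.Chars.isdigit c))
    let modtype := String.mk ((PySem.List.pyGet? temp 1).getD [])    -- temp[1]; none (IndexError) excluded by Pre_
    if mods.contains modtype then
      let d := mods.getD modtype PySem.Dict.empty
      let d' := if d.contains residue then d.insert residue (d.getD residue 0 + 1)
                else d.insert residue 1
      mods.insert modtype d'
    else
      mods.insert modtype (PySem.Dict.ofList [(residue, 1)])
    ) (PySem.Dict.empty : PySem.Dict String (PySem.Dict String Int))
  mods.items.map (fun p => (p.1, p.2.items))

-- ===== PORT B =====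
-- per-token parser (Source B's _token_pair); identical parsing steps to A's loop prologue
def pvTokenPair (tok : String) : String × String :=
  let mod1 := PySem.Chars.strip tok.toList
  let mod2 := PySem.Chars.replace mod1 [')','('] ['_']
  let temp := PySem.Chars.splitOn (PySem.List.slice mod2 none (some (-1))) ['(']
  let residue := String.mk (((PySem.List.pyGet? temp 0).getD []).filter (fun c => !PySem.Chars.isdigit c))
  (String.mk ((PySem.List.pyGet? temp 1).getD []), residue)

def parse_mods_alt (modstring : String) : List (String × List (String × Int)) :=
  let pairs := ((PySem.Chars.splitOn modstring.toList [';']).map String.mk).map pvTokenPair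
  let groups := pairs.foldl (fun d p => d.modify p.1 [] (· ++ [p.2]))
    (PySem.Dict.empty : PySem.Dict String (List String))             -- groups.setdefault(mt, []).append(r)
  groups.items.map (fun g =>
    (g.1, (PySem.List.dedup g.2).map (fun r => (r, (List.count r g.2 : Int)))))

-- ===== PRECONDITION & SPEC =====
-- Pre_ excludes exactly the inputs where A raises IndexError at temp[1]: some semicolon-separated
-- token, after stripping/replacing and dropping its last character, contains no opening parenthesis
-- (e.g. the empty modification string).
def Pre_parse_mods (modstring : String) : Prop :=
  ∀ tok ∈ PySem.Chars.splitOn modstring.toList [';'],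
    2 ≤ (PySem.Chars.splitOn
          (PySem.List.slice (PySem.Chars.replace (PySem.Chars.strip tok) [')','('] ['_']) none (some (-1)))
          ['(']).length
instance (modstring : String) : Decidable (Pre_parse_mods modstring) := by unfold Pre_parse_mods; infer_instance
def pvWitness_parse_mods : String := "N-Term(Prot)(Acetyl); S6(Phospho); C9(Phospho)"
def Spec_parse_mods (modstring : String) (out : List (String × List (String × Int))) : Prop := out = parse_mods_alt modstring
instance (modstring : String) (out : List (String × List (String × Int))) : Decidable (Spec_parse_mods modstring out) := by unfold Spec_parse_mods; infer_instance

-- ===== CLAIM (what is proved, stated in full; the proofs are below) =====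
def Claim_equal_parse_mods : Prop := ∀ (modstring : String), Dom_parse_mods modstring → Pre_parse_mods modstring → Spec_parse_mods modstring (parse_mods modstring)

-- ===== LEMMAS AND PROOFS =====

-- A's loop body applied to a parsed pair (the per-token parsing factored out)
def pvStep (mods : PySem.Dict String (PySem.Dict String Int)) (p : String × String) :
    PySem.Dict String (PySem.Dict String Int) :=
  if mods.contains p.1 then
    let d := mods.getD p.1 PySem.Dict.empty
    let d' := if d.contains p.2 then d.insert p.2 (d.getD p.2 0 + 1) else d.insert p.2 1
    mods.insert p.1 d'
  else
    mods.insert p.1 (PySem.Dict.ofList [(p.2, 1)])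

-- the same step in unified insert form
def pvStep' (mods : PySem.Dict String (PySem.Dict String Int)) (p : String × String) :
    PySem.Dict String (PySem.Dict String Int) :=
  mods.insert p.1 ((mods.getD p.1 PySem.Dict.empty).insert p.2
    ((mods.getD p.1 PySem.Dict.empty).getD p.2 0 + 1))

lemma pvStep_eq : pvStep = pvStep' := by
  funext mods p
  simp only [pvStep, pvStep']
  by_cases hc : mods.contains p.1 = true
  · simp only [hc, if_true]
    by_cases hr : (mods.getD p.1 PySem.Dict.empty).contains p.2 = true
    · simp [hr]
    · rw [PySem.Dict.getD_of_not_contains _ (0 : Int) (by simpa using hr)]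
      norm_num
  · simp only [hc]
    rw [PySem.Dict.getD_of_not_contains _ PySem.Dict.empty (by simpa using hc)]
    rfl

-- Φ maps a grouping dict to A's nested count dict, value-wise
def pvPhi (g : PySem.Dict String (List String)) : PySem.Dict String (PySem.Dict String Int) :=
  PySem.Dict.mk (g.items.map (fun p => (p.1, PySem.Dict.counter p.2)))

lemma pvPhi_contains (g : PySem.Dict String (List String)) (k : String) :
    (pvPhi g).contains k = g.contains k := by
  simp [pvPhi, PySem.Dict.contains, List.any_map, Function.comp_def]

lemma pvPhi_get?_aux (l : List (String × List String)) (k : String) :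
    (PySem.Dict.mk (l.map (fun p => (p.1, PySem.Dict.counter p.2)))).get? k
      = ((PySem.Dict.mk l).get? k).map PySem.Dict.counter := by
  induction l with
  | nil => rfl
  | cons p t ih =>
    obtain ⟨k', v⟩ := p
    simp only [List.map_cons]
    by_cases h : (k' == k) = true <;> simp [PySem.Dict.get?_mk_cons, h, ih]

lemma pvPhi_getD (g : PySem.Dict String (List String)) (k : String) :
    (pvPhi g).getD k PySem.Dict.empty = PySem.Dict.counter (g.getD k []) := by
  have h := pvPhi_get?_aux g.items k
  simp only [PySem.Dict.getD, pvPhi]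
  rw [h]
  rcases g.get? k with _ | rs <;> rfl

lemma pvPhi_insert (g : PySem.Dict String (List String)) (k : String) (v : List String) :
    pvPhi (g.insert k v) = (pvPhi g).insert k (PySem.Dict.counter v) := by
  apply PySem.Dict.ext
  rw [show (pvPhi (g.insert k v)).items
        = (g.insert k v).items.map (fun p => (p.1, PySem.Dict.counter p.2)) from rfl,
      PySem.Dict.items_insert, PySem.Dict.items_insert, pvPhi_contains]
  by_cases hc : g.contains k = true
  · simp only [hc, if_true, pvPhi, List.map_map]
    refine List.map_congr_left (fun p _ => ?_)
    by_cases hk : p.1 = k <;> simp [hk]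
  · simp [hc, pvPhi]

lemma pvPhi_comm (g : PySem.Dict String (List String)) (p : String × String) :
    pvStep' (pvPhi g) p = pvPhi (g.modify p.1 [] (· ++ [p.2])) := by
  simp only [pvStep', PySem.Dict.modify, pvPhi_insert, pvPhi_getD,
    PySem.Dict.counter_append_singleton]

lemma pvMain (pairs : List (String × String)) (g : PySem.Dict String (List String)) :
    pairs.foldl pvStep' (pvPhi g) =
      pvPhi (pairs.foldl (fun d p => d.modify p.1 [] (· ++ [p.2])) g) := by
  induction pairs generalizing g with
  | nil => rfl
  | cons p ps ih => simp only [List.foldl_cons, pvPhi_comm, ih]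

-- ===== VERDICT (by name: the statement is the Claim_ definition above) =====
theorem parse_mods_spec : Claim_equal_parse_mods := by
  intro modstring _ _
  show parse_mods modstring = parse_mods_alt modstring
  simp only [parse_mods, parse_mods_alt]
  rw [show (fun (mods : PySem.Dict String (PySem.Dict String Int)) (mod : String) =>
        let mod1 := PySem.Chars.strip mod.toList
        let mod2 := PySem.Chars.replace mod1 [')','('] ['_']
        let temp := PySem.Chars.splitOn (PySem.List.slice mod2 none (some (-1))) ['(']
        let residue := String.mk (((PySem.List.pyGet? temp 0).getD []).filter (fun c => !PySem.Chars.isdigit c))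
        let modtype := String.mk ((PySem.List.pyGet? temp 1).getD [])
        if mods.contains modtype then
          let d := mods.getD modtype PySem.Dict.empty
          let d' := if d.contains residue then d.insert residue (d.getD residue 0 + 1)
                    else d.insert residue 1
          mods.insert modtype d'
        else
          mods.insert modtype (PySem.Dict.ofList [(residue, 1)])) =
      (fun mods tok => pvStep mods (pvTokenPair tok)) from rfl]
  rw [← List.foldl_map (f := pvTokenPair) (g := pvStep)]
  rw [pvStep_eq]
  rw [show (PySem.Dict.empty : PySem.Dict String (PySem.Dict String Int)) = pvPhi PySem.Dict.empty from rfl]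
  rw [pvMain]
  simp only [pvPhi, List.map_map]
  apply List.map_congr_left
  intro q _
  simp [PySem.Dict.items_counter, PySem.List.dedup_eq_ofList, Function.comp]
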